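-- pv_equiv track=rewrite | github.com/wyf162/pythonProject | leetcode/string_problem/dict_order/2663.py | smallestBeautifulString
-- ===== SOURCE A (Python) =====
-- from string import ascii_lowercase
--
-- def smallestBeautifulString(s: str, k: int) -> str:
--     alphabet = ascii_lowercase[:k]
--
--     def next_string(s, k):
--         ss = list(s)
--         carry = 1
--         for i in range(len(ss)-1, -1, -1):
--             idx = ord(ss[i]) - ord('a')
--             carry, idx = divmod(idx+carry, k)
--             ss[i] = alphabet[idx]
--         if carry:
--             ss.insert(0, 'a')
--         return ''.join(ss)
--
--     def check(s):
--         n = len(s)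
--         for i in range(1, n):
--             if s[i] == s[i-1]:
--                 return False
--         for i in range(2, n):
--             if s[i] == s[i-2]:
--                 return False
--         return True
--
--     t = next_string(s, k)
--     while len(t) == len(s):
--         if check(t):
--             return t
--         t = next_string(t, k)
--     return ''
-- ===== SOURCE B (Python) =====
-- def smallestBeautifulString(s: str, k: int) -> str:
--     # Value-based search: compute value(s)+1 in base k once, then repeatedly jump
--     # past the whole block of candidates that share the prefix up to the first
--     # palindromic violation, instead of incrementing one by one.
--     if k < 1:
--         return ''
--     n = len(s)
--     v = 0
--     for c in s:
--         v = v * k + (ord(c) - 97)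
--     v += 1
--     limit = k ** n
--     m = v
--     while 0 <= m < limit:
--         # big-endian digits of m
--         d = []
--         x = m
--         for _ in range(n):
--             d.append(x % k)
--             x //= k
--         d.reverse()
--         # first position with a length-2 or length-3 palindrome ending there
--         p = -1
--         for j in range(1, n):
--             if d[j] == d[j - 1] or (j >= 2 and d[j] == d[j - 2]):
--                 p = j
--                 break
--         if p == -1:
--             return ''.join(chr(97 + t) for t in d)
--         step = k ** (n - 1 - p)
--         m = (m // step + 1) * step
--     return ''
-- ===== Notes on version B (the rewrite author's own statement) =====
-- stated objective: alternative
-- what changed: B replaces A's increment-by-one-and-recheck enumeration of candidate strings by arithmetic on the string's base-k value: it computes value(s)+1 in one pass and then repeatedly jumps straight past the whole block of candidates that share the prefix up to the first palindromic violation (next multiple of k^(n-1-p)), so only polynomially many candidates are ever inspected.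
-- outside the precondition, e.g. on smallestBeautifulString('bb', -6): A returns 'aq', B returns ''; on smallestBeautifulString('a', 100): A returns 'b', B returns 'b'; on smallestBeautifulString('~~', 27): A returns '', B returns ''
import Mathlib
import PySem

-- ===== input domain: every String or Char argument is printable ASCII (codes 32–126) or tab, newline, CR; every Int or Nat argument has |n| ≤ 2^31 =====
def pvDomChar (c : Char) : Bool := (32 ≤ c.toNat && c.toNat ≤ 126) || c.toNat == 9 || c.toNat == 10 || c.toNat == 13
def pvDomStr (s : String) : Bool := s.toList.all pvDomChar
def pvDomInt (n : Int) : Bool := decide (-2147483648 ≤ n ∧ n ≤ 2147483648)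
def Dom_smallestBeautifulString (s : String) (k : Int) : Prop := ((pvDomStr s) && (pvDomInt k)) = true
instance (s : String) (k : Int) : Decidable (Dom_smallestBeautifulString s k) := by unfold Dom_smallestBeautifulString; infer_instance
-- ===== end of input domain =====

-- B replaces A's one-by-one "increment and re-check" search over strings by arithmetic on the
-- string's base-k value: it computes value(s)+1 once and then jumps past the whole block of
-- candidates sharing the prefix up to the first palindromic violation, so far fewer candidates
-- are inspected.

-- ===== PORT A =====
-- ord(c) - ord('a')
def pvDigit (c : Char) : Int := (c.toNat : Int) - 97

-- alphabet = ascii_lowercase[:k]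
def pvAlph (k : Int) : List Char :=
  PySem.List.slice "abcdefghijklmnopqrstuvwxyz".toList none (some k)

-- the body of next_string's index loop (right to left, carry threaded);
-- none = a raise in Python (ZeroDivisionError from divmod when k = 0,
-- IndexError from alphabet[idx] when idx ≥ len(alphabet)) — excluded by Pre_.
def pvNsCore (k : Int) (alph : List Char) : List Char → Option (Int × List Char)
  | [] => some (1, [])
  | c :: rest =>
    match pvNsCore k alph rest with
    | none => none
    | some pr =>
      match PySem.Int.divmod? (pvDigit c + pr.1) k with
      | none => none
      | some qr =>
        match PySem.List.pyGet? alph qr.2 with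
        | none => none
        | some ch => some (qr.1, ch :: pr.2)

-- next_string: run the carry loop; 'if carry: ss.insert(0, "a")'
def pvNextString (k : Int) (alph : List Char) (s : List Char) : Option (List Char) :=
  match pvNsCore k alph s with
  | none => none
  | some pr => some (if pr.1 ≠ 0 then 'a' :: pr.2 else pr.2)

-- check: the two index loops with early 'return False' = short-circuiting 'all';
-- the pyGetD defaults are never read (every index is in range).
def pvCheck (t : List Char) : Bool :=
  ((PySem.List.pyRange 1 (t.length : Int) 1).all fun i =>
      !(PySem.List.pyGetD t i 'a' == PySem.List.pyGetD t (i - 1) 'a'))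
  && ((PySem.List.pyRange 2 (t.length : Int) 1).all fun i =>
      !(PySem.List.pyGetD t i 'a' == PySem.List.pyGetD t (i - 2) 'a'))

-- the 'while len(t) == len(s)' loop; fuel is a totality guard only: (k^n).toNat + 1
-- steps provably suffice on every input allowed by Pre_ (each step increases the value by 1,
-- which stays below k^n).  On k < 0 (outside Pre_) Python may loop unboundedly.
def pvLoopA (k : Int) (alph : List Char) (n : Nat) : Nat → List Char → List Char
  | 0, _ => []
  | fuel + 1, t =>
    if t.length ≠ n then []
    else if pvCheck t then t
    else
      match pvNextString k alph t with
      | none => []   -- Python raises here (k = 0 or k > 26 index error) — outside Pre_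
      | some t2 => pvLoopA k alph n fuel t2

def smallestBeautifulString (s : String) (k : Int) : String :=
  let alph := pvAlph k
  match pvNextString k alph s.toList with
  | none => ""   -- Python raises here — outside Pre_
  | some t => String.ofList (pvLoopA k alph s.toList.length ((k ^ s.toList.length).toNat + 1) t)

-- ===== PORT B =====
-- chr(97 + m)
def pvChOf (m : Int) : Char := Char.ofNat (97 + m.toNat)

-- Source B's digit loop: n times 'd.append(x % k); x //= k'
def pvDigitsLE (k : Int) : Nat → Int → List Int
  | 0, _ => []
  | j + 1, x => PySem.Int.mod x k :: pvDigitsLE k j (PySem.Int.floordiv x k)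

-- the violation test of Source B's scan at index j
def pvViol (d : List Int) (j : Int) : Bool :=
  (PySem.List.pyGetD d j 0 == PySem.List.pyGetD d (j - 1) 0)
  || (decide (2 ≤ j) && (PySem.List.pyGetD d j 0 == PySem.List.pyGetD d (j - 2) 0))

-- Source B's 'p = -1; for j in range(1, n): ... p = j; break'
def pvFirstViol (d : List Int) : Int :=
  match (PySem.List.pyRange 1 (d.length : Int) 1).find? (pvViol d) with
  | some j => j
  | none => -1

-- Source B's while loop; fuel is a totality guard only ((k^n).toNat + 1 provably suffices:
-- m grows by at least 1 per step and stays below k^n; Source B enters only with k ≥ 1).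
def pvLoopB (k : Int) (n : Nat) (limit : Int) : Nat → Int → List Char
  | 0, _ => []
  | fuel + 1, m =>
    if 0 ≤ m ∧ m < limit then
      let d := (pvDigitsLE k n m).reverse
      let p := pvFirstViol d
      if p = -1 then d.map pvChOf
      else
        -- k ** (n - 1 - p); the exponent n - 1 - p is ≥ 0 whenever p comes from the scan
        let step := k ^ ((n : Int) - 1 - p).toNat
        pvLoopB k n limit fuel ((PySem.Int.floordiv m step + 1) * step)
    else []

def smallestBeautifulString_alt (s : String) (k : Int) : String :=
  if k < 1 then "" else
  let n := s.toList.length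
  let v := s.toList.foldl (fun a c => a * k + ((c.toNat : Int) - 97)) 0 + 1
  String.ofList (pvLoopB k n (k ^ n) ((k ^ n).toNat + 1) v)

-- ===== PRECONDITION & SPEC =====
-- Pre_ is the problem's natural domain for k (LeetCode 2663 guarantees 1 ≤ 4 ≤ k ≤ 26).
-- Outside it A raises on part of the inputs (ZeroDivisionError at k = 0, IndexError for
-- k > 26 whenever the search reaches a digit ≥ 26 and for k ≤ -26) and its value elsewhere
-- is an artefact of Python slicing/negative-index wraparound on ascii_lowercase[:k].
def Pre_smallestBeautifulString (s : String) (k : Int) : Prop := 1 ≤ k ∧ k ≤ 26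
instance (s : String) (k : Int) : Decidable (Pre_smallestBeautifulString s k) := by
  unfold Pre_smallestBeautifulString; infer_instance

def pvWitness_smallestBeautifulString : String × Int := ("cab", 4)

def Spec_smallestBeautifulString (s : String) (k : Int) (out : String) : Prop :=
  out = smallestBeautifulString_alt s k
instance (s : String) (k : Int) (out : String) : Decidable (Spec_smallestBeautifulString s k out) := by
  unfold Spec_smallestBeautifulString; infer_instance

-- ===== CLAIM (what is proved, stated in full; the proofs are below) =====
def Claim_equal_smallestBeautifulString : Prop :=
  ∀ (s : String) (k : Int), Dom_smallestBeautifulString s k →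
    Pre_smallestBeautifulString s k →
    Spec_smallestBeautifulString s k (smallestBeautifulString s k)

-- ===== LEMMAS AND PROOFS =====

-- value of a char list read as a base-k numeral with digit ord(c)-97 (big-endian)
def pvValD (k : Int) : List Char → Int
  | [] => 0
  | c :: r => pvDigit c * k ^ r.length + pvValD k r

-- big-endian base-k digit list of length j (used with 0 ≤ m < k^j)
def pvRepD (k : Int) : Nat → Int → List Int
  | 0, _ => []
  | j + 1, m => (m / k ^ j) :: pvRepD k j (m % k ^ j)

-- reference search: the first m' ≥ m below k^n whose digit string passes pvCheck
def pvAnsFrom (k : Int) (n : Nat) (m : Int) : List Char :=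
  if h : 1 ≤ k ∧ 0 ≤ m ∧ m < k ^ n then
    if pvCheck ((pvRepD k n m).map pvChOf) then (pvRepD k n m).map pvChOf
    else pvAnsFrom k n (m + 1)
  else []
termination_by (k ^ n - m).toNat
decreasing_by
  obtain ⟨-, -, h3⟩ := h; omega

-- ---- integer arithmetic helpers ----
theorem pvKpow_pos (k : Int) (hk : 1 ≤ k) (j : Nat) : 0 < k ^ j := pow_pos (by omega) j

theorem pvRepD_length (k : Int) : ∀ (j : Nat) (m : Int), (pvRepD k j m).length = j := by
  intro j
  induction j with
  | zero => intro m; rfl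
  | succ j ih => intro m; simp [pvRepD, ih]

theorem pvLowerGet : ∀ i : Nat, i < 26 →
    ("abcdefghijklmnopqrstuvwxyz".toList)[i]? = some (Char.ofNat (97 + i)) := by decide





theorem pvEdivZeroIff (a b : Int) (h : 0 < b) : a / b = 0 ↔ 0 ≤ a ∧ a < b := by
  constructor
  · intro h0
    refine ⟨?_, ?_⟩
    · by_contra hneg
      have : a / b < 0 := Int.ediv_neg_of_neg_of_pos (by omega) h
      omega
    · by_contra hge
      have : 1 ≤ a / b := Int.le_ediv_iff_mul_le h |>.2 (by omega)
      omega
  · rintro ⟨h1, h2⟩; exact Int.ediv_eq_zero_of_lt h1 h2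

theorem pvAR2 (K L x : Int) (hK : 0 < K) : x % (K * L) / K = x / K % L := by
  have hq : x % (K * L) = x + (-(x / (K * L) * L)) * K := by
    rw [Int.emod_def]; ring
  rw [hq, Int.add_mul_ediv_right _ _ (by omega : K ≠ 0),
      Int.ediv_ediv_of_nonneg hK.le |>.symm.trans rfl]
  rw [Int.emod_def (x / K) L, Int.ediv_ediv_of_nonneg hK.le]
  ring

theorem pvAR3 (K L x : Int) : x % (K * L) % K = x % K :=
  Int.emod_emod_of_dvd x (dvd_mul_right K L)

-- ---- alphabet / char facts ----

theorem pvAlphGet (k r : Int) (h1 : 1 ≤ k) (h2 : k ≤ 26) (hr0 : 0 ≤ r) (hrk : r < k) :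
    PySem.List.pyGet? (pvAlph k) r = some (pvChOf r) := by
  unfold pvAlph
  rw [PySem.List.slice_to _ (by omega : (0:Int) ≤ k), PySem.List.pyGet?_of_nonneg _ hr0]
  have hr26 : r.toNat < 26 := by omega
  have hrk' : r.toNat < k.toNat := by omega
  rw [List.getElem?_take_of_lt hrk', pvLowerGet r.toNat hr26]
  rfl

theorem pvDigit_pvChOf (m : Int) (h0 : 0 ≤ m) (h26 : m < 26) : pvDigit (pvChOf m) = m := by
  have h : ∀ i : Nat, i < 26 → pvDigit (pvChOf (i : Int)) = (i : Int) := by decide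
  have := h m.toNat (by omega)
  rwa [Int.toNat_of_nonneg h0] at this

theorem pvChOf_inj (a b : Int) (ha0 : 0 ≤ a) (ha : a < 26) (hb0 : 0 ≤ b) (hb : b < 26)
    (h : pvChOf a = pvChOf b) : a = b := by
  have := pvDigit_pvChOf a ha0 ha
  have := pvDigit_pvChOf b hb0 hb
  rw [h] at *; omega

-- ---- pvRepD structure ----

theorem pvRepD_bounds (k : Int) (hk : 1 ≤ k) :
    ∀ (j : Nat) (m : Int), 0 ≤ m → m < k ^ j → ∀ a ∈ pvRepD k j m, 0 ≤ a ∧ a < k := by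
  intro j
  induction j with
  | zero => intro m _ _ a ha; simp [pvRepD] at ha
  | succ j ih =>
    intro m h0 hlt a ha
    have hK := pvKpow_pos k hk j
    simp only [pvRepD, List.mem_cons] at ha
    rcases ha with h | h
    · subst h
      constructor
      · exact Int.ediv_nonneg h0 hK.le
      · rw [Int.ediv_lt_iff_lt_mul hK]
        calc m < k ^ (j + 1) := hlt
        _ = k * k ^ j := by ring

    · exact ih (m % k ^ j) (Int.emod_nonneg m (by omega)) (Int.emod_lt_of_pos m hK) a h

theorem pvValD_repD (k : Int) (hk : 1 ≤ k) (hk26 : k ≤ 26) :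
    ∀ (j : Nat) (m : Int), 0 ≤ m → m < k ^ j →
      pvValD k ((pvRepD k j m).map pvChOf) = m := by
  intro j
  induction j with
  | zero =>
    intro m h0 hlt
    simp [pvRepD, pvValD]
    simp [pow_zero] at hlt
    omega
  | succ j ih =>
    intro m h0 hlt
    have hK := pvKpow_pos k hk j
    have hd0 : 0 ≤ m / k ^ j := Int.ediv_nonneg h0 hK.le
    have hdk : m / k ^ j < k := by
      rw [Int.ediv_lt_iff_lt_mul hK]
      calc m < k ^ (j + 1) := hlt
        _ = k * k ^ j := by ring
    simp only [pvRepD, List.map_cons, pvValD, List.length_map, pvRepD_length]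
    rw [pvDigit_pvChOf _ hd0 (by omega),
        ih (m % k ^ j) (Int.emod_nonneg m (by omega)) (Int.emod_lt_of_pos m hK)]
    have := Int.mul_ediv_add_emod m (k ^ j)
    linarith

theorem pvRepD_snoc (k : Int) (hk : 1 ≤ k) :
    ∀ (j : Nat) (M : Int),
      pvRepD k (j + 1) (M % k ^ (j + 1)) = pvRepD k j ((M / k) % k ^ j) ++ [M % k] := by
  intro j
  induction j with
  | zero =>
    intro M
    simp [pvRepD, pow_one, pow_zero]
  | succ j ih =>
    intro M
    have hK := pvKpow_pos k hk (j + 1)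
    have hKj := pvKpow_pos k hk j
    have e1 : (M % k ^ (j + 1 + 1)) % k ^ (j + 1) = M % k ^ (j + 1) := by
      have : k ^ (j + 1 + 1) = k ^ (j + 1) * k := by ring
      rw [this]; exact pvAR3 _ _ _
    have e2 : (M % k ^ (j + 1 + 1)) / k ^ (j + 1) = (M / k ^ (j + 1)) % k := by
      have : k ^ (j + 1 + 1) = k ^ (j + 1) * k := by ring
      rw [this]; exact pvAR2 _ _ _ hK
    have e3 : (M / k ^ (j + 1)) % k = ((M / k) % k ^ (j + 1)) / k ^ j := by
      have h1 : ((M / k) % k ^ (j + 1)) / k ^ j = ((M / k) / k ^ j) % k := by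
        have : k ^ (j + 1) = k ^ j * k := by ring
        rw [this]; exact pvAR2 _ _ _ hKj
      have h2 : M / k / k ^ j = M / k ^ (j + 1) := by
        rw [Int.ediv_ediv_of_nonneg (by omega : (0:Int) ≤ k)]
        congr 1; ring
      rw [h1, h2]
    have e4 : ((M / k) % k ^ (j + 1)) % k ^ j = (M / k) % k ^ j := by
      have : k ^ (j + 1) = k ^ j * k := by ring
      rw [this]; exact pvAR3 _ _ _
    show (M % k ^ (j+1+1)) / k ^ (j+1) :: pvRepD k (j+1) ((M % k ^ (j+1+1)) % k ^ (j+1))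
       = ((M / k) % k ^ (j+1)) / k ^ j :: (pvRepD k j (((M / k) % k ^ (j+1)) % k ^ j) ++ [M % k])
    rw [e1, e2, e3, e4, ih M]

theorem pvDigitsLE_reverse (k : Int) (hk : 1 ≤ k) :
    ∀ (j : Nat) (x : Int), 0 ≤ x →
      (pvDigitsLE k j x).reverse = pvRepD k j (x % k ^ j) := by
  intro j
  induction j with
  | zero => intro x _; simp [pvDigitsLE, pvRepD]
  | succ j ih =>
    intro x hx
    have hkpos : (0:Int) < k := by omega
    simp only [pvDigitsLE, List.reverse_cons]
    rw [PySem.Int.floordiv_eq_ediv_of_pos hkpos, PySem.Int.mod_eq_emod_of_pos hkpos,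
        ih (x / k) (Int.ediv_nonneg hx hkpos.le), pvRepD_snoc k hk j x]

theorem pvRepD_split (k : Int) (hk : 1 ≤ k) :
    ∀ (a b : Nat) (M : Int),
      pvRepD k (a + b) (M % k ^ (a + b)) =
        pvRepD k a ((M / k ^ b) % k ^ a) ++ pvRepD k b (M % k ^ b) := by
  intro a
  induction a with
  | zero =>
    intro b M
    simp [pvRepD]
  | succ a ih =>
    intro b M
    have hKb := pvKpow_pos k hk b
    have hKa := pvKpow_pos k hk a
    have hKab := pvKpow_pos k hk (a + b)
    have e1 : (M % k ^ (a + 1 + b)) / k ^ (a + b) = (M / k ^ (a + b)) % k := by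
      have : k ^ (a + 1 + b) = k ^ (a + b) * k := by ring
      rw [this]; exact pvAR2 _ _ _ hKab
    have e2 : ((M / k ^ b) % k ^ (a + 1)) / k ^ a = (M / k ^ (a + b)) % k := by
      have h1 : k ^ (a + 1) = k ^ a * k := by ring
      rw [h1, pvAR2 _ _ _ hKa, Int.ediv_ediv_of_nonneg hKb.le]
      congr 2; ring
    have e3 : (M % k ^ (a + 1 + b)) % k ^ (a + b) = M % k ^ (a + b) := by
      have : k ^ (a + 1 + b) = k ^ (a + b) * k := by ring
      rw [this]; exact pvAR3 _ _ _
    have e4 : ((M / k ^ b) % k ^ (a + 1)) % k ^ a = (M / k ^ b) % k ^ a := by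
      have : k ^ (a + 1) = k ^ a * k := by ring
      rw [this]; exact pvAR3 _ _ _
    have hn : a + 1 + b = a + b + 1 := by ring
    rw [hn] at e1 e3 ⊢
    simp only [pvRepD, List.cons_append]
    rw [e1, e2, e3, e4, ih b M]

-- ---- next_string characterisation ----
theorem pvNsCore_eq (k : Int) (hk : 1 ≤ k) (hk26 : k ≤ 26) :
    ∀ t : List Char,
      pvNsCore k (pvAlph k) t =
        some ((pvValD k t + 1) / k ^ t.length,
              (pvRepD k t.length ((pvValD k t + 1) % k ^ t.length)).map pvChOf) := by
  intro t
  induction t with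
  | nil => simp [pvNsCore, pvValD, pvRepD]
  | cons c rest ih =>
    have hkpos : (0:Int) < k := by omega
    have hK := pvKpow_pos k hk rest.length
    set j := rest.length with hj
    set K := k ^ j with hKdef
    set xr := pvValD k rest + 1 with hxr
    set d := pvDigit c with hd
    have hx : pvValD k (c :: rest) + 1 = xr + d * K := by
      simp only [pvValD, hxr, hd, hKdef, hj]; ring
    have hxK : (xr + d * K) / K = d + xr / K := by
      rw [Int.add_mul_ediv_right _ _ (by omega : K ≠ 0)]; ring
    have hpow : k ^ (rest.length + 1) = K * k := by rw [hKdef]; ring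
    have hr0 : 0 ≤ (d + xr / K) % k := Int.emod_nonneg _ (by omega)
    have hrk : (d + xr / K) % k < k := Int.emod_lt_of_pos _ hkpos
    simp only [pvNsCore, ih, PySem.Int.divmod?, if_neg (by omega : ¬ k = 0),
      Int.fdiv_eq_ediv_of_nonneg _ hkpos.le, Int.fmod_eq_emod_of_nonneg _ hkpos.le]
    rw [pvAlphGet k _ hk hk26 hr0 hrk]
    simp only [List.length_cons, hx, hpow]
    have hcarry : (d + xr / K) / k = (xr + d * K) / (K * k) := by
      rw [← Int.ediv_ediv_of_nonneg hK.le, hxK]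
    have hhead : ((xr + d * K) % (K * k)) / K = (d + xr / K) % k := by
      rw [pvAR2 _ _ _ hK, hxK]
    have htail : ((xr + d * K) % (K * k)) % K = xr % K := by
      rw [pvAR3, mul_comm d K, Int.add_mul_emod_self_left]
    simp only [pvRepD, List.map_cons]
    have hKr : k ^ rest.length = K := rfl
    rw [hKr, hhead, htail, ← hd, hcarry]

-- ---- check / violation scan ----
theorem pvGetD_mem (d : List Int) (i : Int) (h1 : 0 ≤ i) (h2 : i < (d.length : Int)) :
    PySem.List.pyGetD d i 0 ∈ d := by
  rw [PySem.List.pyGetD_eq_getElem d 0 h1 h2]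
  exact List.getElem_mem _

theorem pvCharEq (d : List Int) (hb : ∀ a ∈ d, 0 ≤ a ∧ a < 26) (i i' : Int)
    (h1 : 0 ≤ i) (h2 : i < (d.length : Int)) (h3 : 0 ≤ i') (h4 : i' < (d.length : Int)) :
    ((PySem.List.pyGetD (d.map pvChOf) i 'a' == PySem.List.pyGetD (d.map pvChOf) i' 'a') = true)
    ↔ (PySem.List.pyGetD d i 0 = PySem.List.pyGetD d i' 0) := by
  have e : ('a' : Char) = pvChOf 0 := rfl
  rw [beq_iff_eq, e, PySem.List.pyGetD_map, PySem.List.pyGetD_map]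
  constructor
  · intro h
    have b1 := hb _ (pvGetD_mem d i h1 h2)
    have b2 := hb _ (pvGetD_mem d i' h3 h4)
    exact pvChOf_inj _ _ b1.1 b1.2 b2.1 b2.2 h
  · intro h; rw [h]

theorem pvViol_false_iff (d : List Int) (j : Int) :
    pvViol d j = false ↔
      (¬ PySem.List.pyGetD d j 0 = PySem.List.pyGetD d (j - 1) 0)
      ∧ (2 ≤ j → ¬ PySem.List.pyGetD d j 0 = PySem.List.pyGetD d (j - 2) 0) := by
  simp only [pvViol, Bool.or_eq_false_iff, Bool.and_eq_false_iff, beq_eq_false_iff_ne, ne_eq,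
    decide_eq_false_iff_not, not_le]
  constructor
  · rintro ⟨a, b⟩
    refine ⟨a, fun h2 => ?_⟩
    rcases b with b | b
    · omega
    · exact b
  · rintro ⟨a, b⟩
    refine ⟨a, ?_⟩
    by_cases h2 : 2 ≤ j
    · exact Or.inr (b h2)
    · exact Or.inl (by omega)

theorem pvGetD_take_eq (d d' : List Int) (m : Nat) (hpre : d.take m = d'.take m)
    (j : Int) (hj0 : 0 ≤ j) (hjm : j < (m : Int)) :
    PySem.List.pyGetD d j 0 = PySem.List.pyGetD d' j 0 := by
  rw [PySem.List.pyGetD_of_nonneg _ _ hj0, PySem.List.pyGetD_of_nonneg _ _ hj0]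
  have hjn : j.toNat < m := by omega
  have h1 : d[j.toNat]? = d'[j.toNat]? := by
    rw [← List.getElem?_take_of_lt (l := d) hjn, ← List.getElem?_take_of_lt (l := d') hjn, hpre]
  simp only [List.getD, h1]


theorem pvFirstViol_neg_iff (d : List Int) :
    pvFirstViol d = -1 ↔ ∀ j : Int, 1 ≤ j → j < (d.length : Int) → pvViol d j = false := by
  unfold pvFirstViol
  cases h : (PySem.List.pyRange 1 (d.length : Int) 1).find? (pvViol d) with
  | none =>
    simp only []
    constructor
    · intro _ j hj1 hj2
      have := List.find?_eq_none.1 h j (PySem.List.mem_pyRange_one.2 ⟨hj1, hj2⟩)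
      simpa using this
    · intro _; trivial
  | some j =>
    simp only []
    have hmem := List.mem_of_find?_eq_some h
    obtain ⟨hj1, hj2⟩ := PySem.List.mem_pyRange_one.1 hmem
    have hv := List.find?_some h
    constructor
    · intro hj; omega
    · intro hall
      have := hall j hj1 hj2
      rw [this] at hv; cases hv

theorem pvFirstViol_pos (d : List Int) (p : Int) (hp : pvFirstViol d = p) (hne : p ≠ -1) :
    1 ≤ p ∧ p < (d.length : Int) ∧ pvViol d p = true := by
  unfold pvFirstViol at hp
  cases h : (PySem.List.pyRange 1 (d.length : Int) 1).find? (pvViol d) with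
  | none => rw [h] at hp; exact absurd hp.symm (by omega)
  | some j =>
    rw [h] at hp
    cases hp
    have hmem := List.mem_of_find?_eq_some h
    obtain ⟨hj1, hj2⟩ := PySem.List.mem_pyRange_one.1 hmem
    exact ⟨hj1, hj2, List.find?_some h⟩

theorem pvCheck_map_iff (d : List Int) (hb : ∀ a ∈ d, 0 ≤ a ∧ a < 26) :
    pvCheck (d.map pvChOf) = true ↔
      ∀ j : Int, 1 ≤ j → j < (d.length : Int) → pvViol d j = false := by
  have hlen : ((d.map pvChOf).length : Int) = (d.length : Int) := by
    simp
  simp only [pvCheck, Bool.and_eq_true, List.all_eq_true, hlen]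
  constructor
  · rintro ⟨ha1, ha2⟩ j hj1 hj2
    have h1 := ha1 j (PySem.List.mem_pyRange_one.2 ⟨hj1, hj2⟩)
    rw [Bool.not_eq_eq_eq_not, Bool.not_true, ← Bool.not_eq_true,
        pvCharEq d hb j (j-1) (by omega) hj2 (by omega) (by omega)] at h1
    rw [pvViol_false_iff]
    refine ⟨h1, fun hj2' => ?_⟩
    have h2 := ha2 j (PySem.List.mem_pyRange_one.2 ⟨hj2', hj2⟩)
    rw [Bool.not_eq_eq_eq_not, Bool.not_true, ← Bool.not_eq_true,
        pvCharEq d hb j (j-2) (by omega) hj2 (by omega) (by omega)] at h2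
    exact h2
  · intro hv
    constructor
    · intro i hmem
      obtain ⟨hi1, hi2⟩ := PySem.List.mem_pyRange_one.1 hmem
      have := (pvViol_false_iff d i).1 (hv i hi1 hi2)
      rw [Bool.not_eq_eq_eq_not, Bool.not_true, ← Bool.not_eq_true,
          pvCharEq d hb i (i-1) (by omega) hi2 (by omega) (by omega)]
      exact this.1
    · intro i hmem
      obtain ⟨hi1, hi2⟩ := PySem.List.mem_pyRange_one.1 hmem
      have := (pvViol_false_iff d i).1 (hv i (by omega) hi2)
      rw [Bool.not_eq_eq_eq_not, Bool.not_true, ← Bool.not_eq_true,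
          pvCharEq d hb i (i-2) (by omega) hi2 (by omega) (by omega)]
      exact this.2 hi1

theorem pvViol_transfer (d d' : List Int) (p : Int) (h1 : 1 ≤ p)
    (hpre : d.take (p.toNat + 1) = d'.take (p.toNat + 1)) (hv : pvViol d p = true) :
    pvViol d' p = true := by
  have e0 : PySem.List.pyGetD d p 0 = PySem.List.pyGetD d' p 0 :=
    pvGetD_take_eq d d' _ hpre p (by omega) (by omega)
  have e1 : PySem.List.pyGetD d (p-1) 0 = PySem.List.pyGetD d' (p-1) 0 :=
    pvGetD_take_eq d d' _ hpre (p-1) (by omega) (by omega)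
  simp only [pvViol, Bool.or_eq_true, Bool.and_eq_true, beq_iff_eq, decide_eq_true_eq] at hv ⊢
  rcases hv with h | ⟨h2, h⟩
  · exact Or.inl (by rw [← e0, ← e1, h])
  · have e2 : PySem.List.pyGetD d (p-2) 0 = PySem.List.pyGetD d' (p-2) 0 :=
      pvGetD_take_eq d d' _ hpre (p-2) (by omega) (by omega)
    exact Or.inr ⟨h2, by rw [← e0, ← e2, h]⟩

-- ---- the two loops both compute pvAnsFrom ----
theorem pvLoopA_eq (k : Int) (hk : 1 ≤ k) (hk26 : k ≤ 26) (n : Nat) :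
    ∀ (fuel : Nat) (m : Int), 0 ≤ m → m < k ^ n → (k ^ n - m).toNat < fuel →
      pvLoopA k (pvAlph k) n fuel ((pvRepD k n m).map pvChOf) = pvAnsFrom k n m := by
  intro fuel
  induction fuel with
  | zero => intro m _ _ hf; omega
  | succ fuel ih =>
    intro m h0 hlt hf
    have hlen : ((pvRepD k n m).map pvChOf).length = n := by
      rw [List.length_map, pvRepD_length]
    have hKn := pvKpow_pos k hk n
    rw [pvAnsFrom]
    rw [dif_pos ⟨hk, h0, hlt⟩]
    simp only [pvLoopA, hlen, if_neg (by omega : ¬ n ≠ n)]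
    by_cases hchk : pvCheck ((pvRepD k n m).map pvChOf)
    · rw [if_pos hchk, if_pos hchk]
    · rw [if_neg hchk, if_neg hchk]
      have hval : pvValD k ((pvRepD k n m).map pvChOf) = m := pvValD_repD k hk hk26 n m h0 hlt
      simp only [pvNextString, pvNsCore_eq k hk hk26, hlen, hval]
      by_cases hm1 : m + 1 < k ^ n
      · have hc0 : (m + 1) / k ^ n = 0 := (pvEdivZeroIff _ _ hKn).2 ⟨by omega, hm1⟩
        have hmod : (m + 1) % k ^ n = m + 1 := Int.emod_eq_of_lt (by omega) hm1
        simp only [hc0, hmod]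
        rw [if_neg (show ¬ ((0:Int) ≠ 0) by omega)]
        exact ih (m + 1) (by omega) hm1 (by omega)
      · -- m + 1 = k ^ n: the carry is 1, next_string grows, both sides give []
        have hme : m + 1 = k ^ n := by omega
        have hc1 : (m + 1) / k ^ n = 1 := by rw [hme, Int.ediv_self (by omega)]
        simp only [hc1, ne_eq, one_ne_zero, not_false_eq_true, if_pos]
        have hlen2 : ('a' :: (pvRepD k n ((m + 1) % k ^ n)).map pvChOf).length = n + 1 := by
          simp [pvRepD_length]
        cases fuel with
        | zero =>
          rw [pvAnsFrom, dif_neg (by omega)]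
          rfl
        | succ fuel2 =>
          rw [pvAnsFrom, dif_neg (by omega)]
          simp only [pvLoopA, hlen2, if_pos (by omega : n + 1 ≠ n)]

theorem pvAnsFrom_skip (k : Int) (hk : 1 ≤ k) (n : Nat) :
    ∀ (m m' : Int), 0 ≤ m → m ≤ m' → m' ≤ k ^ n →
      (∀ x : Int, m ≤ x → x < m' → pvCheck ((pvRepD k n x).map pvChOf) = false) →
      pvAnsFrom k n m = pvAnsFrom k n m' := by
  have main : ∀ (c : Nat) (m m' : Int), (m' - m).toNat ≤ c → 0 ≤ m → m ≤ m' → m' ≤ k ^ n →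
      (∀ x : Int, m ≤ x → x < m' → pvCheck ((pvRepD k n x).map pvChOf) = false) →
      pvAnsFrom k n m = pvAnsFrom k n m' := by
    intro c
    induction c with
    | zero =>
      intro m m' hc _ hle _ _
      have : m = m' := by omega
      rw [this]
    | succ c ih =>
      intro m m' hc h0 hle hub hx
      by_cases heq : m = m'
      · rw [heq]
      · have hlt : m < m' := by omega
        rw [pvAnsFrom, dif_pos ⟨hk, h0, by omega⟩, if_neg (by simp [hx m le_rfl hlt])]
        exact ih (m + 1) m' (by omega) (by omega) (by omega) hub
          (fun x hx1 hx2 => hx x (by omega) hx2)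
  intro m m' h0 hle hub hx
  exact main (m' - m).toNat m m' le_rfl h0 hle hub hx

theorem pvLoopB_eq (k : Int) (hk : 1 ≤ k) (hk26 : k ≤ 26) (n : Nat) :
    ∀ (fuel : Nat) (m : Int), 0 ≤ m → (k ^ n - m).toNat < fuel →
      pvLoopB k n (k ^ n) fuel m = pvAnsFrom k n m := by
  intro fuel
  induction fuel with
  | zero => intro m _ hf; omega
  | succ fuel ih =>
    intro m h0 hf
    have hKn := pvKpow_pos k hk n
    by_cases hcond : m < k ^ n
    case neg =>
      simp only [pvLoopB, if_neg (by omega : ¬ (0 ≤ m ∧ m < k ^ n))]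
      rw [pvAnsFrom, dif_neg (by omega)]
    case pos =>
    have hmod : m % k ^ n = m := Int.emod_eq_of_lt h0 hcond
    have hd : (pvDigitsLE k n m).reverse = pvRepD k n m := by
      rw [pvDigitsLE_reverse k hk n m h0, hmod]
    have hdlen : (pvRepD k n m).length = n := pvRepD_length k n m
    have hbounds : ∀ a ∈ pvRepD k n m, 0 ≤ a ∧ a < 26 := by
      intro a ha
      have := pvRepD_bounds k hk n m h0 hcond a ha
      omega
    simp only [pvLoopB, if_pos (⟨h0, hcond⟩ : 0 ≤ m ∧ m < k ^ n), hd]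
    by_cases hp : pvFirstViol (pvRepD k n m) = -1
    · rw [if_pos hp]
      rw [pvAnsFrom, dif_pos ⟨hk, h0, hcond⟩,
        if_pos ((pvCheck_map_iff _ hbounds).2 ((pvFirstViol_neg_iff (pvRepD k n m)).1 hp))]
    · rw [if_neg hp]
      obtain ⟨hp1, hp2, hpv⟩ := pvFirstViol_pos _ _ rfl hp
      rw [hdlen] at hp2
      set p := pvFirstViol (pvRepD k n m) with hpdef
      set q := p.toNat with hqdef
      have hpq : p = (q : Int) := by omega
      have hqn : q + 1 ≤ n := by omega
      set e : Nat := ((n : Int) - 1 - p).toNat with hedef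
      have hen : n = (q + 1) + e := by omega
      have hstep := pvKpow_pos k hk e
      set step := k ^ e with hstepdef
      have hfd : PySem.Int.floordiv m step = m / step := PySem.Int.floordiv_eq_ediv_of_pos hstep
      set m' := (m / step + 1) * step with hm'def
      have hmm' : m < m' := Int.lt_ediv_add_one_mul_self m hstep
      have hkn_split : k ^ n = k ^ (q + 1) * step := by
        rw [hstepdef, hen]; ring
      have hub : m' ≤ k ^ n := by
        have h1 : m / step < k ^ (q + 1) := by
          rw [Int.ediv_lt_iff_lt_mul hstep]
          omega
        have := mul_le_mul_of_nonneg_right (by omega : m / step + 1 ≤ k ^ (q + 1)) hstep.le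
        omega
      -- every value in [m, m') still has the violation at position p
      have hskip : ∀ x : Int, m ≤ x → x < m' → pvCheck ((pvRepD k n x).map pvChOf) = false := by
        intro x hx1 hx2
        have hx0 : 0 ≤ x := by omega
        have hxlt : x < k ^ n := by omega
        have hxq : x / step = m / step := by
          have l1 : m / step ≤ x / step := Int.ediv_le_ediv hstep hx1
          have l2 : x / step < m / step + 1 := by
            rw [Int.ediv_lt_iff_lt_mul hstep]; omega
          omega
        have hsplit : ∀ y : Int, 0 ≤ y → y < k ^ n →
            pvRepD k n y = pvRepD k (q + 1) ((y / step) % k ^ (q + 1)) ++ pvRepD k e (y % step) := by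
          intro y hy0 hylt
          have h1 := pvRepD_split k hk (q + 1) e y
          rw [← hen, Int.emod_eq_of_lt hy0 hylt, ← hstepdef] at h1
          exact h1
        have htake : (pvRepD k n x).take (q + 1) = (pvRepD k n m).take (q + 1) := by
          rw [hsplit x hx0 hxlt, hsplit m h0 hcond, hxq,
            List.take_left' (pvRepD_length k (q+1) _), List.take_left' (pvRepD_length k (q+1) _)]
        have hviolx : pvViol (pvRepD k n x) p = true := by
          refine pvViol_transfer (pvRepD k n m) (pvRepD k n x) p hp1 ?_ hpv
          rw [← hqdef, htake]
        have hxbounds : ∀ a ∈ pvRepD k n x, 0 ≤ a ∧ a < 26 := by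
          intro a ha
          have := pvRepD_bounds k hk n x hx0 hxlt a ha
          omega
        cases hchk : pvCheck ((pvRepD k n x).map pvChOf) with
        | false => rfl
        | true =>
          have := (pvCheck_map_iff _ hxbounds).1 hchk p hp1 (by rw [pvRepD_length]; omega)
          rw [hviolx] at this; cases this
      rw [hfd, ← hm'def]
      rw [ih m' (by omega) (by omega)]
      exact (pvAnsFrom_skip k hk n m m' h0 hmm'.le hub hskip).symm

-- value of the initial string: B's foldl equals pvValD
theorem pvFoldl_valD (k : Int) :
    ∀ (l : List Char) (a : Int),
      l.foldl (fun a c => a * k + ((c.toNat : Int) - 97)) a = a * k ^ l.length + pvValD k l := by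
  intro l
  induction l with
  | nil => intro a; simp [pvValD]
  | cons c r ih =>
    intro a
    simp only [List.foldl_cons, List.length_cons, pvValD]
    rw [ih]
    simp only [pvDigit]
    ring

-- ===== VERDICT (by name: the statement is the Claim_ definition above) =====
theorem smallestBeautifulString_spec : Claim_equal_smallestBeautifulString := by
  unfold Claim_equal_smallestBeautifulString
  intro s k _ hpre
  obtain ⟨hk1, hk2⟩ := hpre
  unfold Spec_smallestBeautifulString
  set L := s.toList with hL
  set n := L.length with hn
  set x := pvValD k L + 1 with hx
  have hKn := pvKpow_pos k hk1 n
  have hfold : L.foldl (fun a c => a * k + ((c.toNat : Int) - 97)) 0 + 1 = x := by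
    rw [pvFoldl_valD]; rw [hx]; ring
  simp only [smallestBeautifulString, smallestBeautifulString_alt, pvNextString,
    pvNsCore_eq k hk1 hk2, ← hL, ← hn, ← hx, hfold, if_neg (show ¬ k < 1 by omega)]
  by_cases hcase : 0 ≤ x ∧ x < k ^ n
  · have hc0 : x / k ^ n = 0 := (pvEdivZeroIff _ _ hKn).2 hcase
    have hmod : x % k ^ n = x := Int.emod_eq_of_lt hcase.1 hcase.2
    simp only [hc0, hmod]
    rw [if_neg (show ¬ ((0:Int) ≠ 0) by omega)]
    rw [pvLoopA_eq k hk1 hk2 n ((k ^ n).toNat + 1) x hcase.1 hcase.2 (by omega),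
        pvLoopB_eq k hk1 hk2 n ((k ^ n).toNat + 1) x hcase.1 (by omega)]
  · have hc0 : x / k ^ n ≠ 0 := fun h => hcase ((pvEdivZeroIff _ _ hKn).1 h)
    rw [if_pos hc0]
    have hlen : ('a' :: (pvRepD k n (x % k ^ n)).map pvChOf).length = n + 1 := by
      simp [pvRepD_length]
    simp only [pvLoopA, pvLoopB, hlen, if_pos (show n + 1 ≠ n by omega),
      if_neg (show ¬ (0 ≤ x ∧ x < k ^ n) from hcase)]
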